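-- pv_equiv track=rewrite | github.com/20001LastOrder/ConStrainSolver | constraint_files/raw/08.Expression/program.py | constraint2
-- ===== SOURCE A (Python) =====
-- def constraint2(expression: str) -> bool:
--     """
--     The arithmetic operators (+, -, *, /) in an arithmetic expression shall not appear consecutively.
--     """
--     patterns = [
--         "++",
--         "--",
--         "**",
--         "//",
--         "+-",
--         "-+",
--         "*/",
--         "/*",
--         "/-",
--         "-/",
--         "+/",
--         "/+",
--         "*-",
--         "-*",
--         "*+",
--         "+*",
--     ]
--     return not any(pattern in expression for pattern in patterns)
-- ===== SOURCE B (Python) =====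
-- def constraint2(expression: str) -> bool:
--     """
--     The arithmetic operators (+, -, *, /) in an arithmetic expression shall not appear consecutively.
--     """
--     ops = set('+-*/')
--     return not any(a in ops and b in ops for a, b in zip(expression, expression[1:]))
-- ===== Notes on version B (the rewrite author's own statement) =====
-- stated objective: simpler
-- what changed: Replaces the 16 fixed two-character substring searches with a single linear walk over adjacent character pairs testing membership in the operator set.
import Mathlib
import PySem

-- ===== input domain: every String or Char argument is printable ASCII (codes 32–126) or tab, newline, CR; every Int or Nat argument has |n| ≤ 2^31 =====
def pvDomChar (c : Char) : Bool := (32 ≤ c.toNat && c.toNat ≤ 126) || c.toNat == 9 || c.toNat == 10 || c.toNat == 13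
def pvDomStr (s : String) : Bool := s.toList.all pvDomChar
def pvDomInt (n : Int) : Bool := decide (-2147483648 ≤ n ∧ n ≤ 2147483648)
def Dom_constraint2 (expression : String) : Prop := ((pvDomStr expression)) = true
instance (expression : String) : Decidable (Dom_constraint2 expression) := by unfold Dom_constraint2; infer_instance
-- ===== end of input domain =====

-- B: one linear pass over adjacent character pairs with an operator set, instead of A's 16 substring searches (simpler).
-- ===== PORT A =====
def constraint2 (expression : String) : Bool :=
  let patterns : List String :=
    ["++", "--", "**", "//", "+-", "-+", "*/", "/*",
     "/-", "-/", "+/", "/+", "*-", "-*", "*+", "+*"]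
  !(patterns.any (fun pattern => PySem.Str.isIn pattern expression))

-- ===== PORT B =====
def constraint2_alt (expression : String) : Bool :=
  let ops : PySem.Set Char := PySem.Set.ofList "+-*/".toList
  !((List.zip expression.toList (PySem.List.slice expression.toList (some 1) none)).any
      (fun ab => PySem.Set.contains ops ab.1 && PySem.Set.contains ops ab.2))

-- ===== PRECONDITION & SPEC =====
def Spec_constraint2 (expression : String) (out : Bool) : Prop := out = constraint2_alt expression
instance (expression : String) (out : Bool) : Decidable (Spec_constraint2 expression out) := by unfold Spec_constraint2; infer_instance

-- ===== CLAIM (what is proved, stated in full; the proofs are below) =====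
def Claim_equal_constraint2 : Prop := ∀ (expression : String), Dom_constraint2 expression → Spec_constraint2 expression (constraint2 expression)

-- ===== LEMMAS AND PROOFS =====

-- c is one of the four arithmetic operator characters (B's ops set, unfolded)
def pvIsOp (c : Char) : Bool := PySem.Set.contains (PySem.Set.ofList "+-*/".toList) c

theorem pvIsOp_cases {x : Char} (h : pvIsOp x = true) :
    x = '+' ∨ x = '-' ∨ x = '*' ∨ x = '/' := by
  rw [pvIsOp, PySem.Set.contains_iff, PySem.Set.mem_ofList,
    show ("+-*/" : String).toList = ['+','-','*','/'] from rfl] at h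
  simpa using h

theorem pv_pairs_any_iff (l : List Char) :
    ((List.zip l l.tail).any (fun ab => pvIsOp ab.1 && pvIsOp ab.2) = true)
      ↔ ∃ x y, pvIsOp x = true ∧ pvIsOp y = true ∧ [x, y] <:+: l := by
  induction l with
  | nil => simp
  | cons a t ih =>
      cases t with
      | nil =>
          simp only [List.tail_cons, List.zip_nil_right, List.any_nil]
          constructor
          · intro h; simp at h
          · rintro ⟨x, y, -, -, h⟩
            have := List.IsInfix.length_le h
            simp at this
      | cons b t' =>
          simp only [List.tail_cons] at ih
          simp only [List.tail_cons, List.zip_cons_cons, List.any_cons, Bool.or_eq_true,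
            Bool.and_eq_true]
          rw [ih]
          constructor
          · rintro (⟨hx, hy⟩ | ⟨x, y, hx, hy, h⟩)
            · exact ⟨a, b, hx, hy, ⟨[], t', rfl⟩⟩
            · exact ⟨x, y, hx, hy, h.trans ⟨[a], [], by simp⟩⟩
          · rintro ⟨x, y, hx, hy, h⟩
            rcases List.infix_cons_iff.1 h with hpre | hinf
            · rcases List.cons_prefix_cons.1 hpre with ⟨hxa, hyb⟩
              rcases List.cons_prefix_cons.1 hyb with ⟨hyb', -⟩
              subst hxa; subst hyb'
              exact Or.inl ⟨hx, hy⟩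
            · exact Or.inr ⟨x, y, hx, hy, hinf⟩

theorem pv_patterns_any_iff (l : List Char) :
    ((["++", "--", "**", "//", "+-", "-+", "*/", "/*",
       "/-", "-/", "+/", "/+", "*-", "-*", "*+", "+*"] : List String).any
        (fun pattern => PySem.Chars.isIn pattern.toList l) = true)
      ↔ ∃ x y, pvIsOp x = true ∧ pvIsOp y = true ∧ [x, y] <:+: l := by
  simp only [List.any_cons, List.any_nil, Bool.or_eq_true, Bool.or_false,
    show ("++" : String).toList = ['+','+'] from rfl, show ("--" : String).toList = ['-','-'] from rfl, show ("**" : String).toList = ['*','*'] from rfl, show ("//" : String).toList = ['/','/'] from rfl, show ("+-" : String).toList = ['+','-'] from rfl, show ("-+" : String).toList = ['-','+'] from rfl, show ("*/" : String).toList = ['*','/'] from rfl, show ("/*" : String).toList = ['/','*'] from rfl, show ("/-" : String).toList = ['/','-'] from rfl, show ("-/" : String).toList = ['-','/'] from rfl, show ("+/" : String).toList = ['+','/'] from rfl, show ("/+" : String).toList = ['/','+'] from rfl, show ("*-" : String).toList = ['*','-'] from rfl, show ("-*" : String).toList = ['-','*'] from rfl, show ("*+" : String).toList = ['*','+'] from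 rfl, show ("+*" : String).toList = ['+','*'] from rfl, PySem.Chars.isIn_iff_infix]
  constructor
  · intro h
    rcases h with h|h|h|h|h|h|h|h|h|h|h|h|h|h|h|h
    exacts [⟨'+', '+', by decide, by decide, h⟩,
      ⟨'-', '-', by decide, by decide, h⟩,
      ⟨'*', '*', by decide, by decide, h⟩,
      ⟨'/', '/', by decide, by decide, h⟩,
      ⟨'+', '-', by decide, by decide, h⟩,
      ⟨'-', '+', by decide, by decide, h⟩,
      ⟨'*', '/', by decide, by decide, h⟩,
      ⟨'/', '*', by decide, by decide, h⟩,
      ⟨'/', '-', by decide, by decide, h⟩,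
      ⟨'-', '/', by decide, by decide, h⟩,
      ⟨'+', '/', by decide, by decide, h⟩,
      ⟨'/', '+', by decide, by decide, h⟩,
      ⟨'*', '-', by decide, by decide, h⟩,
      ⟨'-', '*', by decide, by decide, h⟩,
      ⟨'*', '+', by decide, by decide, h⟩,
      ⟨'+', '*', by decide, by decide, h⟩]
  · rintro ⟨x, y, hx, hy, h⟩
    rcases pvIsOp_cases hx with rfl | rfl | rfl | rfl <;>
      rcases pvIsOp_cases hy with rfl | rfl | rfl | rfl <;> tauto

-- ===== VERDICT (by name: the statement is the Claim_ definition above) =====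
theorem constraint2_spec : Claim_equal_constraint2 := by
  intro expression _
  unfold Spec_constraint2 constraint2 constraint2_alt
  simp only [PySem.Str.isIn_eq, PySem.List.slice_from_one]
  congr 1
  rw [Bool.eq_iff_iff, pv_patterns_any_iff]
  exact (pv_pairs_any_iff expression.toList).symm
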